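-- pv_equiv track=rewrite | github.com/RagePly/aoc24 | day22.py | gensecrets
-- ===== SOURCE A (Python) =====
-- def gensecrets(sec,c):
--     arr = [(sec, sec % 10, None)]
--     for _ in range(c):
--         n = sec*64
--         sec = sec ^ n
--         sec %= 16777216
--         n = sec // 32
--         sec = sec ^ n
--         sec %= 16777216
--         n = sec * 2048
--         sec = sec ^ n
--         sec %= 16777216
--         p = sec % 10
--         arr.append((sec, p, p - arr[-1][1]))
--     return arr
-- ===== SOURCE B (Python) =====
-- # One round of the secret update is GF(2)-linear on 24-bit states, so it is
-- # computed as a matrix-vector product over GF(2): xor together the images of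
-- # the basis vectors 2^i (hardcoded below) for each set bit of the state.
-- _BASIS = [137283, 274566, 549132, 1098264, 2196528, 4391009, 8782018, 786820,
--           1573640, 3147280, 6294560, 12589120, 8401024, 24832, 49664, 99328,
--           198656, 397312, 270336, 540672, 1081344, 2162688, 4325376, 8650752]
--
--
-- def _round(r):
--     out = 0
--     for t in _BASIS:
--         if r & 1:
--             out ^= t
--         r >>= 1
--     return out
--
--
-- def gensecrets(sec, c):
--     r = sec % 16777216
--     secrets = [r]
--     for _ in range(c):
--         r = _round(r)
--         secrets.append(r)
--     prices = [sec % 10] + [s % 10 for s in secrets[1:]]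
--     return [(sec, sec % 10, None)] + [
--         (s, p, p - q) for s, p, q in zip(secrets[1:], prices[1:], prices)
--     ]
-- ===== Notes on version B (the rewrite author's own statement) =====
-- stated objective: alternative
-- what changed: A applies the xorshift mix-and-prune arithmetic (mul/xor/div/mod) each round while reading the previous price back out of the growing tuple list; B exploits that the round is GF(2)-linear on 24-bit states and computes each round as a matrix-vector product over GF(2) -- for each set bit of the state it xors a hardcoded basis-image constant -- then builds the secret list, the price list, and the zipped (secret, price, diff) tuples in separate passes.
import Mathlib
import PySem

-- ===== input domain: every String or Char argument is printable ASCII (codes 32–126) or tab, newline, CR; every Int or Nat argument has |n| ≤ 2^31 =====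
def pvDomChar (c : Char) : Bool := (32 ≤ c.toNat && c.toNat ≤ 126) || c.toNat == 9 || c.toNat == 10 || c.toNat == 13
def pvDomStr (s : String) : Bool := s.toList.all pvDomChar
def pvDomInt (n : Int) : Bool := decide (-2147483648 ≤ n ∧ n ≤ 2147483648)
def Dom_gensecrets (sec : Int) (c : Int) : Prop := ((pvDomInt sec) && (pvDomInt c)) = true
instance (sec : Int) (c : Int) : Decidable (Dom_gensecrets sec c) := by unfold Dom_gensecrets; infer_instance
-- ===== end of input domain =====

-- B replaces A's per-round xorshift arithmetic by a GF(2) matrix-vector product over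
-- hardcoded basis images, and builds the output in staged passes (alternative algorithm).

-- ===== PORT A =====
-- A's for-loop over range(c): structural recursion on the remaining iteration count,
-- state = (current sec, arr built so far).  arr[-1][1] is read via pyGet? (-1);
-- arr is nonempty throughout, so the .getD 0 fallback is never taken.
def gensecretsLoopA (sec : Int) (arr : List (Int × Int × Option Int)) :
    Nat → List (Int × Int × Option Int)
  | 0 => arr
  | n + 1 =>
    let s1 := PySem.Int.mod (PySem.Int.bxor sec (sec * 64)) 16777216
    let s2 := PySem.Int.mod (PySem.Int.bxor s1 (PySem.Int.floordiv s1 32)) 16777216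
    let s3 := PySem.Int.mod (PySem.Int.bxor s2 (s2 * 2048)) 16777216
    let p := PySem.Int.mod s3 10
    let prev := ((PySem.List.pyGet? arr (-1)).map (fun t => t.2.1)).getD 0
    gensecretsLoopA s3 (arr ++ [(s3, p, some (p - prev))]) n

def gensecrets (sec : Int) (c : Int) : List (Int × Int × Option Int) :=
  gensecretsLoopA sec [(sec, PySem.Int.mod sec 10, none)] c.toNat

-- ===== PORT B =====
-- the hardcoded images of the 24 basis vectors 2^i under one mix-and-prune round
def pvBasis : List Int :=
  [137283, 274566, 549132, 1098264, 2196528, 4391009, 8782018, 786820,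
   1573640, 3147280, 6294560, 12589120, 8401024, 24832, 49664, 99328,
   198656, 397312, 270336, 540672, 1081344, 2162688, 4325376, 8650752]

-- _round's for-loop over the table: xor in the entry when the low bit is set, then shift
def pvRoundGo : List Int → Int → Int → Int
  | [], _, out => out
  | t :: ts, r, out =>
    pvRoundGo ts (r >>> (1 : Nat)) (if PySem.Int.band r 1 ≠ 0 then PySem.Int.bxor out t else out)

def pvRound (r : Int) : Int := pvRoundGo pvBasis r 0

-- the secrets appended by B's first loop
def pvSecretsGo (r : Int) : Nat → List Int
  | 0 => []
  | n + 1 => let t := pvRound r; t :: pvSecretsGo t n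

def gensecrets_alt (sec : Int) (c : Int) : List (Int × Int × Option Int) :=
  let r := PySem.Int.mod sec 16777216
  let secrets : List Int := r :: pvSecretsGo r c.toNat
  let prices : List Int :=
    PySem.Int.mod sec 10 :: secrets.tail.map (fun s => PySem.Int.mod s 10)
  (sec, PySem.Int.mod sec 10, none) ::
    List.zipWith3 (fun s p q => (s, p, some (p - q))) secrets.tail prices.tail prices

-- ===== PRECONDITION & SPEC =====
def Spec_gensecrets (sec : Int) (c : Int) (out : List (Int × Int × Option Int)) : Prop := out = gensecrets_alt sec c
instance (sec : Int) (c : Int) (out : List (Int × Int × Option Int)) : Decidable (Spec_gensecrets sec c out) := by unfold Spec_gensecrets; infer_instance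

-- ===== CLAIM (what is proved, stated in full; the proofs are below) =====
def Claim_equal_gensecrets : Prop := ∀ (sec : Int) (c : Int), Dom_gensecrets sec c → Spec_gensecrets sec c (gensecrets sec c)

-- ===== LEMMAS AND PROOFS =====

-- A's one full round, as a function (the three stages of the loop body)
def n1I (s : Int) : Int := PySem.Int.mod (PySem.Int.bxor s (s * 64)) 16777216
def n2I (s : Int) : Int := PySem.Int.mod (PySem.Int.bxor s (PySem.Int.floordiv s 32)) 16777216
def n3I (s : Int) : Int := PySem.Int.mod (PySem.Int.bxor s (s * 2048)) 16777216
def stepA (s : Int) : Int := n3I (n2I (n1I s))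

-- the three stages on Nat (all values are nonnegative after the first prune)
def n1 (u : Nat) : Nat := (u ^^^ u * 64) % 16777216
def n2 (u : Nat) : Nat := (u ^^^ u / 32) % 16777216
def n3 (u : Nat) : Nat := (u ^^^ u * 2048) % 16777216
def stepN (u : Nat) : Nat := n3 (n2 (n1 u))

-- Nat version of pvRoundGo
def goN : List Nat → Nat → Nat → Nat
  | [], _, out => out
  | t :: ts, v, out => goN ts (v / 2) (if v % 2 = 1 then out ^^^ t else out)

def tableN : List Nat := (List.range 24).map (fun j => stepN (2 ^ j))

theorem pvBasis_eq : pvBasis = tableN.map (fun n : Nat => (n : Int)) := by decide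

-- --- xor distributes over shifts ---
theorem xor_double (a b : Nat) : 2 * a ^^^ 2 * b = 2 * (a ^^^ b) := by
  have h : (a ^^^ b) <<< 1 = a <<< 1 ^^^ b <<< 1 := Nat.shiftLeft_xor_distrib
  simpa [Nat.shiftLeft_eq, Nat.mul_comm] using h.symm

theorem xor_mul64 (a b : Nat) : (a ^^^ b) * 64 = a * 64 ^^^ b * 64 := by
  have h : (a ^^^ b) <<< 6 = a <<< 6 ^^^ b <<< 6 := Nat.shiftLeft_xor_distrib
  simpa [Nat.shiftLeft_eq] using h

theorem xor_mul2048 (a b : Nat) : (a ^^^ b) * 2048 = a * 2048 ^^^ b * 2048 := by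
  have h : (a ^^^ b) <<< 11 = a <<< 11 ^^^ b <<< 11 := Nat.shiftLeft_xor_distrib
  simpa [Nat.shiftLeft_eq] using h

theorem xor_div32 (a b : Nat) : (a ^^^ b) / 32 = a / 32 ^^^ b / 32 := by
  have h : (a ^^^ b) >>> 5 = a >>> 5 ^^^ b >>> 5 := Nat.shiftRight_xor_distrib
  simpa [Nat.shiftRight_eq_div_pow] using h

-- --- each stage, hence the round, is GF(2)-linear ---
theorem lin1 (x y : Nat) : n1 (x ^^^ y) = n1 x ^^^ n1 y := by
  unfold n1
  rw [show (16777216 : ℕ) = 2 ^ 24 from by norm_num, xor_mul64,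
    show x ^^^ y ^^^ (x * 64 ^^^ y * 64) = (x ^^^ x * 64) ^^^ (y ^^^ y * 64) from by
      simp [Nat.xor_assoc, Nat.xor_comm, Nat.xor_left_comm],
    Nat.xor_mod_two_pow]

theorem lin2 (x y : Nat) : n2 (x ^^^ y) = n2 x ^^^ n2 y := by
  unfold n2
  rw [show (16777216 : ℕ) = 2 ^ 24 from by norm_num, xor_div32,
    show x ^^^ y ^^^ (x / 32 ^^^ y / 32) = (x ^^^ x / 32) ^^^ (y ^^^ y / 32) from by
      simp [Nat.xor_assoc, Nat.xor_comm, Nat.xor_left_comm],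
    Nat.xor_mod_two_pow]

theorem lin3 (x y : Nat) : n3 (x ^^^ y) = n3 x ^^^ n3 y := by
  unfold n3
  rw [show (16777216 : ℕ) = 2 ^ 24 from by norm_num, xor_mul2048,
    show x ^^^ y ^^^ (x * 2048 ^^^ y * 2048) = (x ^^^ x * 2048) ^^^ (y ^^^ y * 2048) from by
      simp [Nat.xor_assoc, Nat.xor_comm, Nat.xor_left_comm],
    Nat.xor_mod_two_pow]

theorem stepN_linear (x y : Nat) : stepN (x ^^^ y) = stepN x ^^^ stepN y := by
  unfold stepN; rw [lin1, lin2, lin3]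

theorem stepN_zero : stepN 0 = 0 := by decide

-- --- xor splits off low bits: 2^k * a + b = 2^k * a ^^^ b for b < 2^k ---
theorem addLowXor : ∀ (k a b : Nat), b < 2 ^ k → 2 ^ k * a + b = (2 ^ k * a ^^^ b)
  | 0, a, b, h => by
      have hb : b = 0 := by omega
      subst hb; simp
  | k + 1, a, b, h => by
      have hb : b / 2 < 2 ^ k := by omega
      have ih := addLowXor k a (b / 2) hb
      have hpow : 2 ^ (k + 1) * a = 2 * (2 ^ k * a) := by ring
      have h2 : (2 * (2 ^ k * a + b / 2)) ^^^ (b % 2) = 2 * (2 ^ k * a + b / 2) + b % 2 := by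
        rcases Nat.mod_two_eq_zero_or_one b with hx | hx
        · simp [hx]
        · rw [hx]; exact Nat.xor_one_of_even (even_two_mul _)
      have h3 : (2 * (b / 2)) ^^^ (b % 2) = 2 * (b / 2) + b % 2 := by
        rcases Nat.mod_two_eq_zero_or_one b with hx | hx
        · simp [hx]
        · rw [hx]; exact Nat.xor_one_of_even (even_two_mul _)
      have h4 : 2 * (b / 2) + b % 2 = b := by omega
      calc 2 ^ (k + 1) * a + b = 2 * (2 ^ k * a + b / 2) + b % 2 := by omega
        _ = (2 * (2 ^ k * a + b / 2)) ^^^ (b % 2) := h2.symm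
        _ = (2 * (2 ^ k * a ^^^ b / 2)) ^^^ (b % 2) := by rw [ih]
        _ = ((2 * (2 ^ k * a)) ^^^ (2 * (b / 2))) ^^^ (b % 2) := by rw [xor_double]
        _ = (2 * (2 ^ k * a)) ^^^ ((2 * (b / 2)) ^^^ (b % 2)) := Nat.xor_assoc ..
        _ = (2 ^ (k + 1) * a ^^^ b) := by rw [h3, h4, hpow]

-- --- complement inside n bits is xor with all-ones ---
theorem compXor : ∀ (n x : Nat), x < 2 ^ n → 2 ^ n - 1 - x = ((2 ^ n - 1) ^^^ x)
  | 0, x, h => by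
      have hx : x = 0 := by omega
      subst hx; rfl
  | n + 1, x, h => by
      have hq : x / 2 < 2 ^ n := by omega
      have ih := compXor n (x / 2) hq
      have hA1 : (2 * (2 ^ n - 1)) ^^^ 1 = 2 * (2 ^ n - 1) + 1 :=
        Nat.xor_one_of_even (even_two_mul _)
      have hone : 1 ≤ 2 ^ n := Nat.one_le_two_pow
      have hsplit : 2 ^ (n + 1) - 1 = 2 * (2 ^ n - 1) + 1 := by rw [pow_succ]; omega
      rcases Nat.mod_two_eq_zero_or_one x with hx | hx
      · have hxe : x = 2 * (x / 2) := by omega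
        have hB : (2 * (2 ^ n - 1 - x / 2)) ^^^ 1 = 2 * (2 ^ n - 1 - x / 2) + 1 :=
          Nat.xor_one_of_even (even_two_mul _)
        rw [hsplit]
        conv_rhs => rw [hxe]
        rw [← hA1,
          show ((2 * (2 ^ n - 1)) ^^^ 1) ^^^ (2 * (x / 2))
              = ((2 * (2 ^ n - 1)) ^^^ (2 * (x / 2))) ^^^ 1 from by
            simp [Nat.xor_comm, Nat.xor_left_comm],
          xor_double, ← ih, hB]
        omega
      · have hB1 : (2 * (x / 2)) ^^^ 1 = 2 * (x / 2) + 1 :=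
          Nat.xor_one_of_even (even_two_mul _)
        have hxe : x = 2 * (x / 2) + 1 := by omega
        rw [hsplit]
        conv_rhs => rw [hxe]
        rw [← hA1, ← hB1,
          show ((2 * (2 ^ n - 1)) ^^^ 1) ^^^ ((2 * (x / 2)) ^^^ 1)
              = (2 * (2 ^ n - 1)) ^^^ (2 * (x / 2)) from by
            simp [Nat.xor_comm, Nat.xor_left_comm],
          xor_double, ← ih]
        omega

-- --- the table-driven fold computes stepN on the low bits ---
theorem goN_spec (m : Nat) : ∀ (k v out : Nat), v < 2 ^ m →
    goN ((List.range m).map (fun j => stepN (2 ^ (k + j)))) v out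
      = out ^^^ stepN (2 ^ k * v) := by
  induction m with
  | zero =>
    intro k v out hv
    have hv0 : v = 0 := by omega
    subst hv0
    simp [goN, stepN_zero]
  | succ m ih =>
    intro k v out hv
    rw [List.range_succ_eq_map]
    simp only [List.map_cons, List.map_map, goN]
    have hmap : (List.range m).map ((fun j => stepN (2 ^ (k + j))) ∘ Nat.succ)
        = (List.range m).map (fun j => stepN (2 ^ (k + 1 + j))) := by
      apply List.map_congr_left
      intro j _
      have hkj : k + Nat.succ j = k + 1 + j := by omega
      simp [Function.comp, hkj]
    rw [hmap, ih (k + 1) (v / 2) _ (by omega)]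
    have hlow : 2 ^ k * (v % 2) < 2 ^ (k + 1) := by
      have h2k := Nat.two_pow_pos k
      have : v % 2 < 2 := by omega
      calc 2 ^ k * (v % 2) < 2 ^ k * 2 := by
            exact (Nat.mul_lt_mul_left h2k).mpr this
        _ = 2 ^ (k + 1) := by rw [pow_succ]
    have hsplit : 2 ^ k * v = (2 ^ (k + 1) * (v / 2) ^^^ 2 ^ k * (v % 2)) := by
      rw [← addLowXor (k + 1) (v / 2) (2 ^ k * (v % 2)) hlow]
      conv_lhs => rw [show v = 2 * (v / 2) + v % 2 from by omega]
      rw [pow_succ]; ring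
    rw [hsplit, stepN_linear]
    rcases Nat.mod_two_eq_zero_or_one v with hv2 | hv2 <;>
      simp [hv2, stepN_zero, Nat.xor_comm, Nat.xor_left_comm]

-- --- bridge from the Int-level fold to the Nat-level fold ---
theorem bridgeGo (ts : List Nat) : ∀ (v out : Nat),
    pvRoundGo (ts.map (fun n : Nat => (n : Int))) (v : Int) (out : Int) = (goN ts v out : Int) := by
  induction ts with
  | nil => intro v out; rfl
  | cons t ts ih =>
    intro v out
    rw [List.map_cons, pvRoundGo, goN]
    have hband : PySem.Int.band (v : Int) 1 = ((v &&& 1 : Nat) : Int) := by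
      simpa using PySem.Int.band_natCast v 1
    have hshift : ((v : Int) >>> (1 : Nat)) = ((v >>> 1 : Nat) : Int) := by
      simp [Int.natCast_shiftRight]
    rw [hband, hshift, Nat.and_one_is_mod, Nat.shiftRight_one]
    rcases Nat.mod_two_eq_zero_or_one v with hv | hv
    all_goals
      simp [hv]
      rw [show ((v : Int)) / 2 = ((v / 2 : Nat) : Int) from by omega]
      exact ih _ _

-- --- A's round on Nat inputs ---
theorem stage_bxor_mod (x y : Nat) :
    PySem.Int.mod (PySem.Int.bxor (x : Int) (y : Int)) 16777216 = ((x ^^^ y) % 16777216 : Nat) := by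
  rw [PySem.Int.bxor_natCast, PySem.Int.mod_eq_emod_of_pos (by norm_num)]
  norm_cast

theorem stage1_nat (w : Nat) : n1I (w : Int) = (n1 w : Int) := by
  unfold n1I
  rw [show ((w : Int) * 64) = ((w * 64 : Nat) : Int) from by push_cast; ring]
  exact stage_bxor_mod w (w * 64)

theorem stage2_nat (w : Nat) : n2I (w : Int) = (n2 w : Int) := by
  unfold n2I
  rw [show PySem.Int.floordiv ((w : Nat) : Int) 32 = ((w / 32 : Nat) : Int) from by
    rw [PySem.Int.floordiv_eq_ediv_of_pos (by norm_num)]; norm_cast]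
  exact stage_bxor_mod w (w / 32)

theorem stage3_nat (w : Nat) : n3I (w : Int) = (n3 w : Int) := by
  unfold n3I
  rw [show ((w : Int) * 2048) = ((w * 2048 : Nat) : Int) from by push_cast; ring]
  exact stage_bxor_mod w (w * 2048)

theorem stepA_nat (u : Nat) : stepA (u : Int) = (stepN u : Int) := by
  unfold stepA stepN
  rw [stage1_nat, stage2_nat, stage3_nat]

-- --- stage one of A's round only depends on the state modulo 2^24 ---
theorem neg_stage (u : Nat) :
    (u ^^^ (64 * u + 63)) % 16777216
      = ((16777215 - u % 16777216) ^^^ (16777215 - u % 16777216) * 64) % 16777216 := by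
  rw [show (16777216 : ℕ) = 2 ^ 24 from by norm_num,
    show (16777215 : ℕ) = 2 ^ 24 - 1 from by norm_num]
  set x := u % 2 ^ 24 with hx
  have hxlt : x < 2 ^ 24 := by omega
  set r := 2 ^ 24 - 1 - x with hr
  have hrlt : r < 2 ^ 24 := by omega
  rw [Nat.xor_mod_two_pow, Nat.xor_mod_two_pow]
  set w := (64 * u + 63) % 2 ^ 24 with hw
  have hwlt : w < 2 ^ 24 := by omega
  have h1 : r % 2 ^ 24 = r := by omega
  have h2 : r * 64 % 2 ^ 24 = 2 ^ 24 - 1 - w := by omega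
  rw [h1, h2]
  have c1 : r = ((2 ^ 24 - 1) ^^^ x) := compXor 24 x hxlt
  have c2 : 2 ^ 24 - 1 - w = ((2 ^ 24 - 1) ^^^ w) := compXor 24 w hwlt
  rw [c1, c2]
  simp only [Nat.xor_left_comm, ← Nat.xor_assoc, Nat.xor_self, Nat.zero_xor]
  rw [← hx]

theorem stage1_trunc (a : Int) : n1I a = n1I (PySem.Int.mod a 16777216) := by
  unfold n1I
  have h0 : (0 : Int) < 16777216 := by norm_num
  have hm : PySem.Int.mod a 16777216 = a % 16777216 := PySem.Int.mod_eq_emod_of_pos h0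
  rcases show 0 ≤ a ∨ a < 0 from by omega with ha | ha
  · obtain ⟨u, rfl⟩ := Int.eq_ofNat_of_zero_le ha
    rw [hm, show ((u : Int) % 16777216) = ((u % 16777216 : Nat) : Int) from by push_cast; ring]
    rw [show (PySem.Int.mod (PySem.Int.bxor (u:Int) ((u:Int) * 64)) 16777216) = n1I (u:Int) from rfl,
      show (PySem.Int.mod (PySem.Int.bxor ((u % 16777216 : Nat):Int) (((u % 16777216 : Nat):Int) * 64)) 16777216) = n1I ((u % 16777216 : Nat):Int) from rfl,
      stage1_nat, stage1_nat]
    norm_cast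
    unfold n1
    rw [show (16777216 : ℕ) = 2 ^ 24 from by norm_num, Nat.xor_mod_two_pow, Nat.xor_mod_two_pow]
    congr 1
    · omega
    · omega
  · set u := (-a - 1).toNat with hu
    have hau : a = -(u : Int) - 1 := by omega
    have ha64 : a * 64 = -(64 * (u : Int)) - 64 := by rw [hau]; ring
    have hbx : PySem.Int.bxor a (a * 64) = ((u ^^^ (64 * u + 63) : Nat) : Int) := by
      simp only [PySem.Int.bxor]
      rw [if_neg (by omega), if_neg (by omega)]
      congr 2
      all_goals omega
    have hr : a % 16777216 = ((16777215 - u % 16777216 : Nat) : Int) := by omega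
    rw [hm, hr]
    rw [show (PySem.Int.mod (PySem.Int.bxor ((16777215 - u % 16777216 : Nat):Int) (((16777215 - u % 16777216 : Nat):Int) * 64)) 16777216) = n1I ((16777215 - u % 16777216 : Nat):Int) from rfl,
      stage1_nat, hbx,
      show PySem.Int.mod ((u ^^^ (64 * u + 63) : Nat) : Int) 16777216
          = (((u ^^^ (64 * u + 63)) % 16777216 : Nat) : Int) from by
        rw [PySem.Int.mod_eq_emod_of_pos h0]; norm_cast]
    norm_cast
    unfold n1
    exact neg_stage u

theorem stepA_trunc (a : Int) : stepA a = stepA (PySem.Int.mod a 16777216) := by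
  unfold stepA
  rw [stage1_trunc]

-- --- pvRound agrees with A's round on reduced states ---
theorem goN_tab (u : Nat) (hu : u < 16777216) : goN tableN u 0 = stepN u := by
  have h := goN_spec 24 0 u 0 (by norm_num; omega)
  rw [show tableN = (List.range 24).map (fun j => stepN (2 ^ (0 + j))) from by simp [tableN]]
  rw [h]
  simp

theorem pvRound_eq (u : Nat) (hu : u < 16777216) : pvRound (u : Int) = stepA (u : Int) := by
  unfold pvRound
  rw [pvBasis_eq, show ((0 : Int)) = ((0 : Nat) : Int) from rfl, bridgeGo,
    goN_tab u hu, stepA_nat]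

theorem key (a : Int) : stepA a = pvRound (PySem.Int.mod a 16777216) := by
  have h0 : (0 : Int) < 16777216 := by norm_num
  have hnn := PySem.Int.mod_nonneg a h0
  have hlt := PySem.Int.mod_lt a h0
  have hcast : PySem.Int.mod a 16777216 = ((PySem.Int.mod a 16777216).toNat : Int) := by omega
  rw [stepA_trunc, hcast, pvRound_eq _ (by omega)]

theorem stepA_nonneg (s : Int) : 0 ≤ stepA s := PySem.Int.mod_nonneg _ (by norm_num)
theorem stepA_lt (s : Int) : stepA s < 16777216 := PySem.Int.mod_lt _ (by norm_num)

-- --- A's secret stream, and the head::tail shape of both results ---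
def secretsA (s : Int) : Nat → List Int
  | 0 => []
  | n + 1 => let t := stepA s; t :: secretsA t n

theorem streamEq (n : Nat) : ∀ s : Int, pvSecretsGo (PySem.Int.mod s 16777216) n = secretsA s n := by
  induction n with
  | zero => intro s; rfl
  | succ n ih =>
    intro s
    have h1 : pvRound (PySem.Int.mod s 16777216) = stepA s := (key s).symm
    have h2 : PySem.Int.mod (stepA s) 16777216 = stepA s := by
      have := stepA_nonneg s; have := stepA_lt s
      rw [PySem.Int.mod_eq_emod_of_pos (by norm_num)]
      omega
    simp only [pvSecretsGo, secretsA, h1]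
    rw [show pvSecretsGo (stepA s) n = pvSecretsGo (PySem.Int.mod (stepA s) 16777216) n from by
      rw [h2], ih (stepA s)]

def tailA (s : Int) : Nat → List (Int × Int × Option Int)
  | 0 => []
  | n + 1 =>
    let t := stepA s
    (t, PySem.Int.mod t 10, some (PySem.Int.mod t 10 - PySem.Int.mod s 10)) :: tailA t n

theorem pyGet_last_append (l : List (Int × Int × Option Int)) (x : Int × Int × Option Int) :
    PySem.List.pyGet? (l ++ [x]) (-1) = some x := by
  simp [PySem.List.pyGet?, PySem.List.pyIdx?]

theorem loopA_eq_tail (n : Nat) : ∀ (sec : Int) (arr : List (Int × Int × Option Int)),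
    ((PySem.List.pyGet? arr (-1)).map (fun t => t.2.1)).getD 0 = PySem.Int.mod sec 10 →
    gensecretsLoopA sec arr n = arr ++ tailA sec n := by
  induction n with
  | zero => intro sec arr _; simp [gensecretsLoopA, tailA]
  | succ n ih =>
    intro sec arr h
    simp only [gensecretsLoopA, tailA, h]
    rw [ih _ _ (by rw [pyGet_last_append]; simp)]
    simp [stepA, n1I, n2I, n3I]

theorem tail_eq_zip (n : Nat) : ∀ (s : Int),
    List.zipWith3 (fun a p q => (a, p, some (p - q)))
      (secretsA s n) ((secretsA s n).map (fun x => PySem.Int.mod x 10))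
      (PySem.Int.mod s 10 :: (secretsA s n).map (fun x => PySem.Int.mod x 10))
      = tailA s n := by
  induction n with
  | zero => intro s; simp [secretsA, tailA]
  | succ n ih => intro s; simp only [secretsA, tailA, List.map, List.zipWith3, ih]

-- ===== VERDICT (by name: the statement is the Claim_ definition above) =====
theorem gensecrets_spec : Claim_equal_gensecrets := by
  intro sec c _
  unfold Spec_gensecrets gensecrets gensecrets_alt
  rw [loopA_eq_tail c.toNat sec _ (by simp [PySem.List.pyGet?, PySem.List.pyIdx?])]
  simp only [List.singleton_append, List.tail_cons, streamEq]
  rw [tail_eq_zip]
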